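-- pv_equiv track=rewrite | github.com/GenuineJianyuan/GEEKnowledgeFramework | eeFlowExtractor_v_0_2/Utils/MKProcess_generator.py | simplify_ids
-- ===== SOURCE A (Python) =====
-- def simplify_ids(json_list):
--     # 用于存储原始ID到简化ID的映射
--     id_map = {}
--     current_id = 1
--
--     # 更新的JSON列表
--     updated_json_list = []
--
--     for item in json_list:
--         # 对于每个项目，检查并更新node1_id和node2_id
--         for node in ['node1_id', 'node2_id']:
--             original_id = item[node]
--             if original_id not in id_map:
--                 id_map[original_id] = current_id
--                 current_id += 1
--             item[node] = id_map[original_id]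
--         updated_json_list.append(item)
--     return updated_json_list
-- ===== SOURCE B (Python) =====
-- def simplify_ids(json_list):
--     # Pass 1: build the complete remap table (read-only).
--     id_map = {}
--     for item in json_list:
--         for node in ('node1_id', 'node2_id'):
--             original_id = item[node]
--             if original_id not in id_map:
--                 id_map[original_id] = len(id_map) + 1
--     # Pass 2: apply the table, mutating the items in place like the original.
--     updated_json_list = []
--     for item in json_list:
--         item['node1_id'] = id_map[item['node1_id']]
--         item['node2_id'] = id_map[item['node2_id']]
--         updated_json_list.append(item)
--     return updated_json_list
-- ===== Notes on version B (the rewrite author's own statement) =====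
-- stated objective: alternative
-- what changed: B splits A's single mutate-as-you-go loop into two differently-shaped passes: a read-only pass that builds the whole remap table (next id = len(id_map)+1, no counter), then a map pass that rewrites both ids from the finished table.
import Mathlib
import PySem

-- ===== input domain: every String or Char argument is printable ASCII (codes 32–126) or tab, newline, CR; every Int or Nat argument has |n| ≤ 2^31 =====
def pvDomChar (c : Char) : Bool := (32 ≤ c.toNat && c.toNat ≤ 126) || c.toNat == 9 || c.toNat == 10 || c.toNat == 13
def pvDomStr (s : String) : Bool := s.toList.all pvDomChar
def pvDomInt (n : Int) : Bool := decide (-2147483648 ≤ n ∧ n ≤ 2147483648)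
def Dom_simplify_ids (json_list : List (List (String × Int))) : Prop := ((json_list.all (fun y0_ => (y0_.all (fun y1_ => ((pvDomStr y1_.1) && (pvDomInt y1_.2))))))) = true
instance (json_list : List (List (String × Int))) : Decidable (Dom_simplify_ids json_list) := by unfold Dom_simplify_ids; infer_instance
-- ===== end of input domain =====

-- B replaces A's single mutate-as-you-go loop (running counter) by a read-only table-building
-- pass (next id = len(id_map)+1) followed by a separate apply pass; same cost ("alternative").
-- Both Pythons mutate the item dicts in place like A; the equivalence is about the return value.

-- ===== PORT A =====
-- one iteration of A's inner `for node in [...]` loop, state = (id_map, current_id, item)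
def pvNodeStepA (s : PySem.Dict Int Int × Int × PySem.Dict String Int) (node : String) :
    PySem.Dict Int Int × Int × PySem.Dict String Int :=
  let m := s.1
  let c := s.2.1
  let d := s.2.2
  let orig := d.getD node 0       -- item[node]; Pre_ guarantees the key is present
  let mc := if m.contains orig then (m, c) else (m.insert orig c, c + 1)
  (mc.1, mc.2, d.insert node (mc.1.getD orig 0))

-- one iteration of A's outer loop, state = (id_map, current_id, updated_json_list)
def pvItemStepA (s : PySem.Dict Int Int × Int × List (List (String × Int)))
    (item : List (String × Int)) : PySem.Dict Int Int × Int × List (List (String × Int)) :=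
  let r := ["node1_id", "node2_id"].foldl pvNodeStepA (s.1, s.2.1, PySem.Dict.mk item)
  (r.1, r.2.1, s.2.2 ++ [r.2.2.items])

def simplify_ids (json_list : List (List (String × Int))) : List (List (String × Int)) :=
  (json_list.foldl pvItemStepA (PySem.Dict.empty, 1, [])).2.2

-- ===== PORT B =====
-- pass 1 body: record the unseen ids of one item (read-only)
def pvCollect (m : PySem.Dict Int Int) (item : List (String × Int)) : PySem.Dict Int Int :=
  ["node1_id", "node2_id"].foldl
    (fun m node =>
      let orig := (PySem.Dict.mk item).getD node 0
      if m.contains orig then m else m.insert orig ((m.size : Int) + 1)) m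

-- pass 2 body: rewrite both ids of one item from the finished table
def pvApply (m : PySem.Dict Int Int) (item : List (String × Int)) : List (String × Int) :=
  let d := PySem.Dict.mk item
  let d1 := d.insert "node1_id" (m.getD (d.getD "node1_id" 0) 0)
  let d2 := d1.insert "node2_id" (m.getD (d1.getD "node2_id" 0) 0)
  d2.items

def simplify_ids_alt (json_list : List (List (String × Int))) : List (List (String × Int)) :=
  let idMap := json_list.foldl pvCollect PySem.Dict.empty
  json_list.map (pvApply idMap)

-- ===== PRECONDITION & SPEC =====
-- Pre_ excludes exactly the inputs on which A raises KeyError: an item missing 'node1_id' or 'node2_id'.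
def Pre_simplify_ids (json_list : List (List (String × Int))) : Prop :=
  ∀ item ∈ json_list, (PySem.Dict.mk item).contains "node1_id" = true ∧
    (PySem.Dict.mk item).contains "node2_id" = true
instance (json_list : List (List (String × Int))) : Decidable (Pre_simplify_ids json_list) := by
  unfold Pre_simplify_ids; infer_instance

def pvWitness_simplify_ids : (List (List (String × Int))) :=
  [[("node1_id", 5), ("node2_id", -3)], [("node2_id", 5), ("node1_id", 7), ("weight", 2)]]

def Spec_simplify_ids (json_list : List (List (String × Int))) (out : List (List (String × Int))) : Prop := out = simplify_ids_alt json_list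
instance (json_list : List (List (String × Int))) (out : List (List (String × Int))) : Decidable (Spec_simplify_ids json_list out) := by unfold Spec_simplify_ids; infer_instance

-- ===== CLAIM (what is proved, stated in full; the proofs are below) =====
def Claim_equal_simplify_ids : Prop := ∀ (json_list : List (List (String × Int))), Dom_simplify_ids json_list → Pre_simplify_ids json_list → Spec_simplify_ids json_list (simplify_ids json_list)

-- ===== LEMMAS AND PROOFS =====

-- `pvExt m M`: every binding of m is still in M (the remap table only ever grows)
def pvExt (m M : PySem.Dict Int Int) : Prop := ∀ k v, m.get? k = some v → M.get? k = some v

theorem pvExt_refl (m : PySem.Dict Int Int) : pvExt m m := fun _ _ h => h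

theorem pvExt_insert_fresh (m : PySem.Dict Int Int) (k : Int) (v : Int)
    (hk : ¬ m.contains k = true) : pvExt m (m.insert k v) := by
  intro k' v' h
  have hne : k' ≠ k := by
    intro e; subst e
    rw [PySem.Dict.contains_eq_isSome_get?, h] at hk; simp at hk
  rw [PySem.Dict.get?_insert_of_ne _ _ hne]; exact h

theorem pvExt_trans {a b c : PySem.Dict Int Int} (h1 : pvExt a b) (h2 : pvExt b c) : pvExt a c :=
  fun k v h => h2 k v (h1 k v h)

theorem pvExt_collect (m : PySem.Dict Int Int) (item : List (String × Int)) :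
    pvExt m (pvCollect m item) := by
  unfold pvCollect
  simp only [List.foldl]
  split_ifs with h1 h2 h2
  · exact pvExt_refl m
  · exact pvExt_insert_fresh _ _ _ h2
  · exact pvExt_insert_fresh _ _ _ h1
  · exact pvExt_trans (pvExt_insert_fresh _ _ _ h1) (pvExt_insert_fresh _ _ _ h2)

theorem pvExt_foldl_collect (jl : List (List (String × Int))) (m : PySem.Dict Int Int) :
    pvExt m (jl.foldl pvCollect m) := by
  induction jl generalizing m with
  | nil => exact pvExt_refl m
  | cons h t ih => exact pvExt_trans (pvExt_collect m h) (ih (pvCollect m h))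

theorem pvExt_getD (m M : PySem.Dict Int Int) (hE : pvExt m M) (k : Int)
    (hk : m.contains k = true) : M.getD k 0 = m.getD k 0 := by
  rw [PySem.Dict.contains_eq_isSome_get?] at hk
  cases hv : m.get? k with
  | none => rw [hv] at hk; simp at hk
  | some v =>
    rw [PySem.Dict.getD_of_get?_eq_some _ _ hv, PySem.Dict.getD_of_get?_eq_some _ _ (hE k v hv)]

theorem pvExt_contains (m M : PySem.Dict Int Int) (hE : pvExt m M) (k : Int)
    (hk : m.contains k = true) : M.contains k = true := by
  rw [PySem.Dict.contains_eq_isSome_get?] at hk ⊢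
  cases hv : m.get? k with
  | none => rw [hv] at hk; simp at hk
  | some v => rw [hE k v hv]; rfl

theorem nodeStep_pos (m : PySem.Dict Int Int) (c : Int) (d : PySem.Dict String Int) (node : String)
    (h : m.contains (d.getD node 0) = true) :
    pvNodeStepA (m, c, d) node = (m, c, d.insert node (m.getD (d.getD node 0) 0)) := by
  simp [pvNodeStepA, h]

theorem nodeStep_neg (m : PySem.Dict Int Int) (c : Int) (d : PySem.Dict String Int) (node : String)
    (h : ¬ m.contains (d.getD node 0) = true) :
    pvNodeStepA (m, c, d) node = (m.insert (d.getD node 0) c, c + 1, d.insert node c) := by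
  simp [pvNodeStepA, h, PySem.Dict.getD_insert_self]

theorem collect_unfold (m : PySem.Dict Int Int) (item : List (String × Int)) :
    pvCollect m item =
      (let o1 := (PySem.Dict.mk item).getD "node1_id" 0
       let o2 := (PySem.Dict.mk item).getD "node2_id" 0
       let m1 := if m.contains o1 then m else m.insert o1 ((m.size : Int) + 1)
       if m1.contains o2 then m1 else m1.insert o2 ((m1.size : Int) + 1)) := rfl

theorem pvItem_step (m : PySem.Dict Int Int) (c : Int) (item : List (String × Int))
    (M : PySem.Dict Int Int) (hc : c = (m.size : Int) + 1)
    (hE : pvExt (pvCollect m item) M) :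
    ["node1_id", "node2_id"].foldl pvNodeStepA (m, c, PySem.Dict.mk item) =
      (pvCollect m item, ((pvCollect m item).size : Int) + 1,
        PySem.Dict.mk (pvApply M item)) := by
  have hne : ("node2_id" : String) ≠ "node1_id" := by decide
  set d0 : PySem.Dict String Int := PySem.Dict.mk item with hd0
  set o1 := d0.getD "node1_id" 0 with ho1
  set o2 := d0.getD "node2_id" 0 with ho2
  have hfold : ["node1_id", "node2_id"].foldl pvNodeStepA (m, c, d0) =
      pvNodeStepA (pvNodeStepA (m, c, d0) "node1_id") "node2_id" := rfl
  rw [hfold]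
  by_cases h1 : m.contains o1 = true
  · -- node1 already mapped: id_map and current_id unchanged
    rw [nodeStep_pos m c d0 "node1_id" h1]
    have hd1 : (d0.insert "node1_id" (m.getD o1 0)).getD "node2_id" 0 = o2 :=
      PySem.Dict.getD_insert_of_ne d0 _ _ hne
    have hcol : pvCollect m item = (if m.contains o2 = true then m else m.insert o2 ((m.size : Int) + 1)) := by
      rw [collect_unfold]; simp only [← ho1, ← ho2, ← hd0, if_pos h1]
    by_cases h2 : m.contains o2 = true
    · rw [nodeStep_pos m c _ "node2_id" (by rw [hd1]; exact h2)]
      rw [hcol, if_pos h2, hd1]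
      have hEm : pvExt m M := by rw [hcol, if_pos h2] at hE; exact hE
      refine Prod.ext rfl (Prod.ext hc ?_)
      simp only [pvApply, ← hd0, ← ho1]
      rw [PySem.Dict.getD_insert_of_ne d0 _ _ hne, ← ho2]
      rw [pvExt_getD m M hEm o1 h1, pvExt_getD m M hEm o2 h2]
    · rw [nodeStep_neg m c _ "node2_id" (by rw [hd1]; exact h2)]
      rw [hcol, if_neg h2, ← hc, hd1]
      have hEm : pvExt (m.insert o2 c) M := by
        rw [hcol, if_neg h2, ← hc] at hE; exact hE
      have hs : (m.insert o2 c).size = m.size + 1 := by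
        rw [PySem.Dict.size_insert]; simp [h2]
      refine Prod.ext rfl (Prod.ext (by show c + 1 = ((m.insert o2 c).size : Int) + 1; rw [hs]; push_cast; omega) ?_)
      simp only [pvApply, ← hd0, ← ho1]
      rw [PySem.Dict.getD_insert_of_ne d0 _ _ hne, ← ho2]
      have hc1 : M.getD o1 0 = m.getD o1 0 := by
        rw [pvExt_getD _ M hEm o1 (pvExt_contains m _ (pvExt_insert_fresh m o2 c h2) o1 h1)]
        exact PySem.Dict.getD_insert_of_ne m _ _ (by intro e; rw [e] at h1; exact h2 h1)
      have hc2 : M.getD o2 0 = c := by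
        rw [pvExt_getD _ M hEm o2 (PySem.Dict.contains_insert_self m o2 c)]
        exact PySem.Dict.getD_insert_self m o2 c 0
      rw [hc1, hc2]
  · -- node1 unseen: it gets id c, current_id becomes c+1
    rw [nodeStep_neg m c d0 "node1_id" h1]
    have hd1 : (d0.insert "node1_id" c).getD "node2_id" 0 = o2 :=
      PySem.Dict.getD_insert_of_ne d0 _ _ hne
    have hcol : pvCollect m item =
        (if (m.insert o1 c).contains o2 = true then m.insert o1 c
         else (m.insert o1 c).insert o2 (((m.insert o1 c).size : Int) + 1)) := by
      rw [collect_unfold]; simp only [← ho1, ← ho2, ← hd0, if_neg h1, ← hc]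
    have hs : (m.insert o1 c).size = m.size + 1 := by
      rw [PySem.Dict.size_insert]; simp [h1]
    have hv1 : (m.insert o1 c).getD o1 0 = c := PySem.Dict.getD_insert_self m o1 c 0
    by_cases h2 : (m.insert o1 c).contains o2 = true
    · rw [nodeStep_pos (m.insert o1 c) (c + 1) _ "node2_id" (by rw [hd1]; exact h2)]
      rw [hcol, if_pos h2, hd1]
      have hEm : pvExt (m.insert o1 c) M := by rw [hcol, if_pos h2] at hE; exact hE
      refine Prod.ext rfl (Prod.ext (by show c + 1 = ((m.insert o1 c).size : Int) + 1; rw [hs]; push_cast; omega) ?_)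
      simp only [pvApply, ← hd0, ← ho1]
      rw [PySem.Dict.getD_insert_of_ne d0 _ _ hne, ← ho2]
      rw [pvExt_getD _ M hEm o1 (PySem.Dict.contains_insert_self m o1 c), hv1]
      rw [pvExt_getD _ M hEm o2 h2]
    · rw [nodeStep_neg (m.insert o1 c) (c + 1) _ "node2_id" (by rw [hd1]; exact h2)]
      rw [hcol, if_neg h2, hs,
        show (((m.size + 1 : Nat) : Int) + 1) = c + 1 by rw [hc]; push_cast; omega, hd1]
      have hne12 : o1 ≠ o2 := by
        intro e; rw [← e, PySem.Dict.contains_insert_self] at h2; exact h2 rfl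
      have hEm : pvExt ((m.insert o1 c).insert o2 (c + 1)) M := by
        rw [hcol, if_neg h2, hs,
          show (((m.size + 1 : Nat) : Int) + 1) = c + 1 by rw [hc]; push_cast; omega] at hE
        exact hE
      have hs2 : ((m.insert o1 c).insert o2 (c + 1)).size = m.size + 2 := by
        rw [PySem.Dict.size_insert]; simp [h2, hs]
      refine Prod.ext rfl
        (Prod.ext (show c + 1 + 1 = (((m.insert o1 c).insert o2 (c + 1)).size : Int) + 1 by rw [hs2]; push_cast; omega) ?_)
      simp only [pvApply, ← hd0, ← ho1]
      rw [PySem.Dict.getD_insert_of_ne d0 _ _ hne, ← ho2]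
      have hm2o1 : ((m.insert o1 c).insert o2 (c + 1)).contains o1 = true := by
        rw [PySem.Dict.contains_insert]
        simp [PySem.Dict.contains_insert_self]
      have hc1 : M.getD o1 0 = c := by
        rw [pvExt_getD _ M hEm o1 hm2o1]
        rw [PySem.Dict.getD_insert_of_ne _ _ _ hne12, hv1]
      have hc2 : M.getD o2 0 = c + 1 := by
        rw [pvExt_getD _ M hEm o2 (PySem.Dict.contains_insert_self _ o2 (c + 1))]
        exact PySem.Dict.getD_insert_self _ o2 (c + 1) 0
      rw [hc1, hc2]

theorem pvMain (jl : List (List (String × Int))) (m : PySem.Dict Int Int) (c : Int)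
    (acc : List (List (String × Int))) (hc : c = (m.size : Int) + 1) :
    (jl.foldl pvItemStepA (m, c, acc)).2.2 = acc ++ jl.map (pvApply (jl.foldl pvCollect m)) := by
  induction jl generalizing m c acc with
  | nil => simp
  | cons h t ih =>
    have hstep := pvItem_step m c h (t.foldl pvCollect (pvCollect m h)) hc
      (pvExt_foldl_collect t (pvCollect m h))
    simp only [List.foldl_cons, List.map_cons, pvItemStepA, hstep]
    rw [ih (pvCollect m h) _ _ rfl]
    simp

-- ===== VERDICT (by name: the statement is the Claim_ definition above) =====
theorem simplify_ids_spec : Claim_equal_simplify_ids := by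
  intro jl _ _
  unfold Spec_simplify_ids simplify_ids simplify_ids_alt
  rw [pvMain jl PySem.Dict.empty 1 [] (by simp [PySem.Dict.size_empty])]
  simp
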